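-- pv_equiv track=rewrite | github.com/the-omega-institute/automath | theory/2026_golden_ratio_driven_scan_projection_generation_recursive_emergence/scripts/exp_parallel_addition_kernels_endpoints_primitive.py | _primitive_from_traces
-- ===== SOURCE A (Python) =====
-- from typing import Dict, List, Tuple
--
-- def _mobius(n: int) -> int:
--     if n == 1:
--         return 1
--     x = n
--     mu = 1
--     p = 2
--     while p * p <= x:
--         if x % p == 0:
--             x //= p
--             mu = -mu
--             if x % p == 0:
--                 return 0
--             while x % p == 0:
--                 x //= p
--         p += 1 if p == 2 else 2
--     if x > 1:
--         mu = -mu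
--     return mu
--
-- def _divisors(n: int) -> List[int]:
--     ds: List[int] = []
--     d = 1
--     while d * d <= n:
--         if n % d == 0:
--             ds.append(d)
--             if d * d != n:
--                 ds.append(n // d)
--         d += 1
--     return sorted(ds)
--
-- def _primitive_from_traces(traces: List[int]) -> List[int]:
--     # traces[k-1] = a_k = Tr(A^k)
--     out: List[int] = []
--     for n in range(1, len(traces) + 1):
--         s = 0
--         for d in _divisors(n):
--             mu = _mobius(d)
--             if mu == 0:
--                 continue
--             s += mu * traces[n // d - 1]
--         if s % n != 0:
--             raise RuntimeError(f"non-integer primitive at n={n}: {s}/{n}")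
--         out.append(s // n)
--     return out
-- ===== SOURCE B (Python) =====
-- from typing import List
--
-- def _primitive_from_traces(traces: List[int]) -> List[int]:
--     # traces[k-1] = a_k = Tr(A^k).  Instead of Mobius-inverting each a_n over the
--     # divisors of n, invert the divisor-sum relation a_n = sum_{d|n} d*p_d directly:
--     # process n = 1..N in order and push each found p_n to all multiples of n.
--     N = len(traces)
--     acc = list(traces)
--     out: List[int] = []
--     for n in range(1, N + 1):
--         s = acc[n - 1]
--         if s % n != 0:
--             raise RuntimeError(f"non-integer primitive at n={n}: {s}/{n}")
--         p = s // n
--         out.append(p)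
--         for m in range(2 * n, N + 1, n):
--             acc[m - 1] -= n * p
--     return out
-- ===== Notes on version B (the rewrite author's own statement) =====
-- stated objective: faster
-- what changed: A Mobius-inverts each trace sum separately, running trial-division mu and a divisor scan for every n (about O(N^1.5) divisor work plus factoring); B never computes mu or divisors at all: it inverts the relation a_n = sum_{d|n} d*p_d forward in one sieve pass, pushing each found p_n to the multiples of n (O(N log N)). Both raise the identical RuntimeError on non-integer primitives; Pre_ excludes exactly those inputs.
import Mathlib
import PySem

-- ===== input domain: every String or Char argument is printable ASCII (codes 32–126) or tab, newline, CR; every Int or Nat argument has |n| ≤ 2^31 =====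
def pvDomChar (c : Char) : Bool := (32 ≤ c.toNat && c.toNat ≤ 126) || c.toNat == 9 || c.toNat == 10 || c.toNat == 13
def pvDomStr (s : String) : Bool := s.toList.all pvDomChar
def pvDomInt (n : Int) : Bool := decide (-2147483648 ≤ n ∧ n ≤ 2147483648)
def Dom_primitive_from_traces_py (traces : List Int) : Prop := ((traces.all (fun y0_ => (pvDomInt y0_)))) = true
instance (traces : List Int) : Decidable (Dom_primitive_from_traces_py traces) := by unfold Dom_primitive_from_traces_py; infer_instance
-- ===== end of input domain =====

-- B replaces A's per-n Möbius inversion over trial-division divisors/μ by a single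
-- forward sieve of the relation a_n = Σ_{d∣n} d·p_d over multiples (objective: faster).
-- Both Pythons raise RuntimeError on exactly the same inputs (non-integer primitive);
-- Pre_ excludes those, since the ports return plain values.

-- ===== PORT A =====
-- while p*p <= x: … (fuel = x.toNat is enough: p grows every iteration and the loop needs p ≤ x)
def mobiusLoopA (fuel : Nat) (x mu p : Int) : Int :=
  match fuel with
  | 0 => if 1 < x then -mu else mu          -- unreachable with the fuel mobiusA supplies
  | f+1 =>
    if p * p ≤ x then
      if PySem.Int.mod x p = 0 then
        let x1 := PySem.Int.floordiv x p
        if PySem.Int.mod x1 p = 0 then 0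
        else
          -- Python's 'while x % p == 0: x //= p' is unreachable here (the previous branch returned)
          mobiusLoopA f x1 (-mu) (p + (if p = 2 then 1 else 2))
      else mobiusLoopA f x mu (p + (if p = 2 then 1 else 2))
    else if 1 < x then -mu else mu

def mobiusA (n : Int) : Int :=
  if n = 1 then 1 else mobiusLoopA n.toNat n 1 2

-- while d*d <= n: … (fuel = n.toNat is enough: d grows every iteration and the loop needs d ≤ n)
def divisorsLoopA (fuel : Nat) (n d : Int) (ds : List Int) : List Int :=
  match fuel with
  | 0 => ds                                  -- unreachable with the fuel divisorsA supplies
  | f+1 =>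
    if d * d ≤ n then
      divisorsLoopA f n (d + 1)
        (if PySem.Int.mod n d = 0 then
           ds ++ [d] ++ (if d * d ≠ n then [PySem.Int.floordiv n d] else [])
         else ds)
    else ds

def divisorsA (n : Int) : List Int :=
  PySem.List.sorted (divisorsLoopA n.toNat n 1 []) (fun x => x) false

def primitive_from_traces_py (traces : List Int) : List Int :=
  (PySem.List.pyRange 1 (PySem.List.len traces + 1) 1).foldl (fun out n =>
    let s := (divisorsA n).foldl (fun s d =>
      let mu := mobiusA d
      if mu = 0 then s
      else s + mu * PySem.List.pyGetD traces (PySem.Int.floordiv n d - 1) 0) 0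
    -- Python: 'if s % n != 0: raise RuntimeError(…)' — exactly those inputs are excluded by Pre_
    out ++ [PySem.Int.floordiv s n]) []

-- ===== PORT B =====
def primitive_from_traces_py_alt (traces : List Int) : List Int :=
  let N : Int := PySem.List.len traces
  ((PySem.List.pyRange 1 (N + 1) 1).foldl (fun (st : List Int × List Int) n =>
      let acc := st.1
      let out := st.2
      let s := PySem.List.pyGetD acc (n - 1) 0
      -- Python: 'if s % n != 0: raise RuntimeError(…)' — exactly those inputs are excluded by Pre_
      let p := PySem.Int.floordiv s n
      let acc' := (PySem.List.pyRange (2 * n) (N + 1) n).foldl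
          (fun acc m => PySem.List.pySetD acc (m - 1) (PySem.List.pyGetD acc (m - 1) 0 - n * p)) acc
      (acc', out ++ [p]))
    (traces, ([] : List Int))).2

-- ===== PRECONDITION & SPEC =====
-- Möbius function given by the defining recurrence Σ_{d∣n} μ(d) = [n = 1] (fuel = n is enough: proper divisors are < n)
def pvMuF : Nat → Nat → Int
  | 0, _ => 0
  | f+1, n =>
    if n ≤ 1 then (if n = 1 then 1 else 0)
    else -(∑ d ∈ Finset.range n, if d ∣ n then pvMuF f d else 0)

def pvMu (n : Nat) : Int := pvMuF n n

-- the Möbius-inverted trace sum at n (the quantity A computes and divides by n)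
def pvS (traces : List Int) (n : Nat) : Int :=
  ∑ d ∈ n.divisors, pvMu d * traces.getD (n / d - 1) 0

-- Both A and B raise RuntimeError (same message) when some inverted sum is not divisible by n;
-- Pre_ excludes exactly those inputs (on every input A returns a value, Pre_ holds).
def Pre_primitive_from_traces_py (traces : List Int) : Prop :=
  ∀ k ∈ Finset.range traces.length, pvS traces (k+1) % ((k : Int) + 1) = 0
instance (traces : List Int) : Decidable (Pre_primitive_from_traces_py traces) := by
  unfold Pre_primitive_from_traces_py; infer_instance

def pvWitness_primitive_from_traces_py : List Int := [2, 4, 8, 16]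

def Spec_primitive_from_traces_py (traces : List Int) (out : List Int) : Prop :=
  out = primitive_from_traces_py_alt traces
instance (traces : List Int) (out : List Int) : Decidable (Spec_primitive_from_traces_py traces out) := by
  unfold Spec_primitive_from_traces_py; infer_instance

-- ===== CLAIM (what is proved, stated in full; the proofs are below) =====
def Claim_equal_primitive_from_traces_py : Prop :=
  ∀ (traces : List Int), Dom_primitive_from_traces_py traces →
    Pre_primitive_from_traces_py traces →
    Spec_primitive_from_traces_py traces (primitive_from_traces_py traces)

-- ===== LEMMAS AND PROOFS =====

-- the common value both programs compute: p_n = S(n)/n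
def pvP (traces : List Int) (n : Nat) : Int := pvS traces n / (n : Int)

def pvCanon (traces : List Int) : List Int :=
  (List.range traces.length).map (fun i => pvP traces (i+1))

-- ---- Section 1: pvMu = moebius ----
theorem sum_divisors_moebius_eq_zero (n : Nat) (h1 : n ≠ 1) :
    ∑ d ∈ n.divisors, (ArithmeticFunction.moebius d : Int) = 0 := by
  rcases Nat.eq_zero_or_pos n with rfl | hn
  · simp
  · have h := congrArg (fun f => f n) ArithmeticFunction.moebius_mul_coe_zeta
    simp only [ArithmeticFunction.mul_apply, ArithmeticFunction.one_apply, h1, if_false] at h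
    rw [← h]
    rw [Nat.sum_divisorsAntidiagonal (f := fun d e => (ArithmeticFunction.moebius d : Int) * ((ArithmeticFunction.zeta : ArithmeticFunction ℤ) e))]
    apply Finset.sum_congr rfl
    intro d hd
    have hne : n / d ≠ 0 := (Nat.div_pos (Nat.le_of_dvd hn (Nat.dvd_of_mem_divisors hd)) (Nat.pos_of_mem_divisors hd)).ne'
    simp [ArithmeticFunction.natCoe_apply, ArithmeticFunction.zeta_apply, hne]

theorem pvMuF_eq (f : Nat) : ∀ (n : Nat), 1 ≤ n → n ≤ f → pvMuF f n = ArithmeticFunction.moebius n := by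
  induction f with
  | zero => intro n h1 hf; omega
  | succ f ih =>
    intro n h1 hf
    rcases eq_or_lt_of_le h1 with h | h2
    · simp [pvMuF, ← h]
    · have hn2 : 2 ≤ n := h2
      have hne1 : ¬ n ≤ 1 := by omega
      rw [pvMuF, if_neg hne1]
      have hstep : ∀ d ∈ Finset.range n, (if d ∣ n then pvMuF f d else 0)
          = (if d ∣ n then (ArithmeticFunction.moebius d : Int) else 0) := by
        intro d hd
        by_cases hdvd : d ∣ n
        · have hd1 : 1 ≤ d := by
            rcases Nat.eq_zero_or_pos d with rfl | h; · exact absurd (Nat.eq_zero_of_zero_dvd hdvd) (by omega)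
            · exact h
          have hdf : d ≤ f := by have := Finset.mem_range.mp hd; omega
          simp [hdvd, ih d hd1 hdf]
        · simp [hdvd]
      rw [Finset.sum_congr rfl hstep]
      have hfil : ∑ d ∈ Finset.range n, (if d ∣ n then (ArithmeticFunction.moebius d : Int) else 0)
          = ∑ d ∈ n.properDivisors, (ArithmeticFunction.moebius d : Int) := by
        rw [← Finset.sum_filter, Nat.filter_dvd_eq_properDivisors (by omega)]
      rw [hfil]
      have hz := sum_divisors_moebius_eq_zero n (by omega)
      rw [← Nat.cons_self_properDivisors (by omega : n ≠ 0), Finset.sum_cons] at hz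
      linarith

theorem pvMu_eq (n : Nat) (h1 : 1 ≤ n) : pvMu n = ArithmeticFunction.moebius n :=
  pvMuF_eq n n h1 le_rfl

-- ---- Section 2: A's trial-division Möbius ----
-- a number with no prime factor below its square root is 1 or prime
theorem prime_of_no_small_factor (x p : Int) (hx : 2 ≤ x) (hp : 2 ≤ p)
    (hmin : ∀ q : Nat, q.Prime → (q:Int) < p → ¬ (q:Int) ∣ x)
    (hlt : x < p * p) : x.toNat.Prime := by
  set X := x.toNat with hXdef
  have hX : (X : Int) = x := Int.toNat_of_nonneg (by omega)
  have hX2 : 2 ≤ X := by omega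
  have hq := Nat.minFac_prime (by omega : X ≠ 1)
  have hqd : X.minFac ∣ X := Nat.minFac_dvd X
  have hqdx : ((X.minFac : Nat) : Int) ∣ x := by
    rw [← hX]; exact_mod_cast hqd
  have hpq : p ≤ (X.minFac : Int) := by
    by_contra hc
    exact hmin X.minFac hq (by omega) hqdx
  by_contra hnp
  have hsq : X.minFac ^ 2 ≤ X := Nat.minFac_sq_le_self (by omega) hnp
  have : p * p ≤ (X.minFac : Int) * X.minFac := by nlinarith
  have : ((X.minFac : Int)) * X.minFac ≤ X := by
    have := hsq
    push_cast [pow_two] at this ⊢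
    exact_mod_cast this
  omega

-- in trial division, the first p that divides x is prime
theorem prime_of_dvd_min (x p : Int) (_hx : 1 ≤ x) (hp : 2 ≤ p)
    (hmin : ∀ q : Nat, q.Prime → (q:Int) < p → ¬ (q:Int) ∣ x)
    (hdvd : p ∣ x) : p.toNat.Prime := by
  set P := p.toNat with hPdef
  have hP : (P : Int) = p := Int.toNat_of_nonneg (by omega)
  by_contra hnp
  have hq := Nat.minFac_prime (by omega : P ≠ 1)
  have hqd : P.minFac ∣ P := Nat.minFac_dvd P
  have hsq : P.minFac ^ 2 ≤ P := Nat.minFac_sq_le_self (by omega) hnp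
  have hq2 : 2 ≤ P.minFac := hq.two_le
  have hqltP : P.minFac < P := by nlinarith [hsq, hq2]
  have hqdx : ((P.minFac : Nat) : Int) ∣ x := by
    have : ((P.minFac : Nat) : Int) ∣ p := by rw [← hP]; exact_mod_cast hqd
    exact this.trans hdvd
  exact hmin P.minFac hq (by omega) hqdx

theorem mobiusLoopA_eq (fuel : Nat) : ∀ (x mu p : Int),
    1 ≤ x → 2 ≤ p → (p = 2 ∨ ¬ (2:Int) ∣ p) →
    (∀ q : Nat, q.Prime → (q:Int) < p → ¬ (q:Int) ∣ x) →
    x < p + fuel →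
    mobiusLoopA fuel x mu p = mu * ArithmeticFunction.moebius x.toNat := by
  induction fuel with
  | zero =>
    intro x mu p hx hp hodd hmin hfuel
    simp only [mobiusLoopA]
    rcases eq_or_lt_of_le hx with h1 | h2
    · rw [if_neg (by omega), ← h1]
      simp
    · rw [if_pos (by omega)]
      have hprime : x.toNat.Prime := prime_of_no_small_factor x p (by omega) hp hmin
        (by have hxp : x < p := by push_cast at hfuel; omega
            nlinarith)
      rw [ArithmeticFunction.moebius_apply_prime hprime]; ring
  | succ f ih =>
    intro x mu p hx hp hodd hmin hfuel
    have hX : (x.toNat : Int) = x := Int.toNat_of_nonneg (by omega)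
    -- the next trial divisor
    have hstep : ∀ x' : Int, (∀ q : Nat, q.Prime → (q:Int) < p → ¬ (q:Int) ∣ x') →
        ¬ p ∣ x' → (∀ q : Nat, q.Prime → (q:Int) < p + (if p = 2 then 1 else 2) → ¬ (q:Int) ∣ x') := by
      intro x' hmin' hnp q hq hqlt
      by_cases hq_lt_p : (q : Int) < p
      · exact hmin' q hq hq_lt_p
      · -- p ≤ q < p + 1 or p + 2
        split_ifs at hqlt with h2
        · -- p = 2, q < 3, ¬ q < 2 → q = 2 = p
          have : (q : Int) = p := by omega
          rw [this]; exact hnp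
        · rcases hodd with h | hoddp
          · exact absurd h h2
          · -- p odd: q = p or q = p+1 (even > 2, not prime)
            rcases eq_or_lt_of_le (not_lt.mp hq_lt_p) with he | hlt2
            · rw [← he]; exact hnp
            · have hqe : (q : Int) = p + 1 := by omega
              exfalso
              have : (2:Int) ∣ q := by
                have : ¬ (2:Int) ∣ (p+1) → False := by
                  intro hnd
                  -- p odd means p+1 even
                  omega
                rcases Int.even_or_odd p with ⟨k, hk⟩ | ⟨k, hk⟩
                · exact absurd ⟨k, by omega⟩ hoddp
                · exact ⟨k+1, by omega⟩
              have h2q : 2 ∣ q := by exact_mod_cast this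
              have := (Nat.Prime.even_iff hq).mp (even_iff_two_dvd.mpr h2q)
              omega
    simp only [mobiusLoopA]
    by_cases hloop : p * p ≤ x
    · rw [if_pos hloop]
      by_cases hdvd : PySem.Int.mod x p = 0
      · rw [if_pos hdvd]
        have hpdvd : p ∣ x := (PySem.Int.mod_eq_zero_iff_dvd x p).mp hdvd
        have hpprime : p.toNat.Prime := prime_of_dvd_min x p hx hp hmin hpdvd
        have hP : (p.toNat : Int) = p := Int.toNat_of_nonneg (by omega)
        set x1 := PySem.Int.floordiv x p with hx1def
        have hx1e : x1 = x / p := by rw [hx1def, PySem.Int.floordiv_eq_ediv_of_pos (by omega)]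
        have hxe : x = p * x1 := by rw [hx1e, Int.mul_ediv_cancel' hpdvd]
        have hx11 : 1 ≤ x1 := by nlinarith
        have hX1 : (x1.toNat : Int) = x1 := Int.toNat_of_nonneg (by omega)
        have hXsplit : x.toNat = p.toNat * x1.toNat := by
          have : ((p.toNat * x1.toNat : Nat) : Int) = (x.toNat : Int) := by
            push_cast; rw [hP, hX1, hX, hxe]
          exact_mod_cast this.symm
        by_cases hdvd2 : PySem.Int.mod x1 p = 0
        · rw [if_pos hdvd2]
          have hp2 : p ∣ x1 := (PySem.Int.mod_eq_zero_iff_dvd x1 p).mp hdvd2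
          have hp2n : p.toNat ∣ x1.toNat := by
            have : (p.toNat : Int) ∣ (x1.toNat : Int) := by rw [hP, hX1]; exact hp2
            exact_mod_cast this
          have hsqd : p.toNat * p.toNat ∣ x.toNat := by
            rw [hXsplit]; exact mul_dvd_mul_left p.toNat hp2n
          have hnsq : ¬ Squarefree x.toNat := fun hsq =>
            absurd (Nat.isUnit_iff.mp (hsq p.toNat hsqd)) (by omega)
          rw [ArithmeticFunction.moebius_eq_zero_of_not_squarefree hnsq, mul_zero]
        · rw [if_neg hdvd2]
          have hnp2 : ¬ p ∣ x1 := fun h => hdvd2 ((PySem.Int.mod_eq_zero_iff_dvd x1 p).mpr h)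
          have hmin1 : ∀ q : Nat, q.Prime → (q:Int) < p → ¬ (q:Int) ∣ x1 := by
            intro q hq hqlt hqd
            exact hmin q hq hqlt (hqd.trans ⟨p, by rw [hxe]; ring⟩)
          have hrec := ih x1 (-mu) (p + (if p = 2 then 1 else 2)) hx11
            (by split_ifs <;> omega)
            (by by_cases h2 : p = 2
                · rw [if_pos h2, h2]; right; decide
                · rw [if_neg h2]; right
                  rcases hodd with h | h; · exact absurd h h2
                  intro ⟨k, hk⟩; exact h ⟨k-1, by omega⟩)
            (hstep x1 hmin1 hnp2)
            (by have h2x1 : 2 * x1 ≤ x := by nlinarith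
                split_ifs <;> omega)
          rw [hrec]
          have hcop : Nat.Coprime p.toNat x1.toNat := by
            rw [Nat.Prime.coprime_iff_not_dvd hpprime]
            intro h
            exact hnp2 (by rw [← hP, ← hX1] at *; exact_mod_cast h)
          have := (ArithmeticFunction.isMultiplicative_moebius).map_mul_of_coprime hcop
          rw [hXsplit, this, ArithmeticFunction.moebius_apply_prime hpprime]
          ring
      · rw [if_neg hdvd]
        have hnp : ¬ p ∣ x := fun h => hdvd ((PySem.Int.mod_eq_zero_iff_dvd x p).mpr h)
        exact ih x mu (p + (if p = 2 then 1 else 2)) hx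
          (by split_ifs <;> omega)
          (by by_cases h2 : p = 2
              · rw [if_pos h2, h2]; right; decide
              · rw [if_neg h2]; right
                rcases hodd with h | h; · exact absurd h h2
                intro ⟨k, hk⟩; exact h ⟨k-1, by omega⟩)
          (hstep x hmin hnp)
          (by split_ifs <;> omega)
    · rw [if_neg hloop]
      rcases eq_or_lt_of_le hx with h1 | h2
      · rw [if_neg (by omega), ← h1]; simp
      · rw [if_pos (by omega)]
        have hprime : x.toNat.Prime := prime_of_no_small_factor x p (by omega) hp hmin (by omega)
        rw [ArithmeticFunction.moebius_apply_prime hprime]; ring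

theorem mobiusA_eq (d : Nat) (h : 1 ≤ d) :
    mobiusA (d : Int) = ArithmeticFunction.moebius d := by
  unfold mobiusA
  by_cases h1 : (d:Int) = 1
  · have hd1 : d = 1 := by exact_mod_cast h1
    rw [if_pos h1, hd1]; simp
  · rw [if_neg h1]
    have hrec := mobiusLoopA_eq ((d:Int)).toNat (d:Int) 1 2 (by exact_mod_cast h) le_rfl (Or.inl rfl)
      (fun q hq hqlt => absurd (by exact_mod_cast hqlt : q < 2) (by have := hq.two_le; omega))
      (by simp)
    rw [hrec]; simp

-- ---- Section 3: the divisor scan sums over n.divisors ----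
theorem divisorsLoopA_sum (g : Int → Int) (fuel : Nat) : ∀ (n d : Int) (ds : List Int),
    1 ≤ n → 1 ≤ d → n < d + fuel →
    ((divisorsLoopA fuel n d ds).map g).sum
      = (ds.map g).sum + ∑ c ∈ Finset.Ico d.toNat (n.toNat + 1),
          (if c * c ≤ n.toNat ∧ c ∣ n.toNat then
             g (c : Int) + (if c * c ≠ n.toNat then g ((n.toNat / c : Nat) : Int) else 0)
           else 0) := by
  induction fuel with
  | zero =>
    intro n d ds hn hd hfuel
    have : Finset.Ico d.toNat (n.toNat + 1) = ∅ := by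
      apply Finset.Ico_eq_empty
      push_cast at hfuel; omega
    simp [divisorsLoopA, this]
  | succ f ih =>
    intro n d ds hn hd hfuel
    have hN : ((n.toNat : Int)) = n := Int.toNat_of_nonneg (by omega)
    have hD : ((d.toNat : Int)) = d := Int.toNat_of_nonneg (by omega)
    simp only [divisorsLoopA]
    by_cases hloop : d * d ≤ n
    · rw [if_pos hloop]
      have hdn : d ≤ n := by nlinarith
      have hdnN : d.toNat < n.toNat + 1 := by omega
      have hccN : d.toNat * d.toNat ≤ n.toNat := by
        have : ((d.toNat * d.toNat : Nat) : Int) ≤ ((n.toNat : Nat) : Int) := by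
          push_cast; rw [hD, hN]; exact hloop
        exact_mod_cast this
      rw [ih n (d+1) _ hn (by omega) (by omega)]
      rw [Finset.sum_eq_sum_Ico_succ_bot hdnN]
      have hd1 : (d+1).toNat = d.toNat + 1 := by omega
      rw [hd1]
      have hdvd_iff : PySem.Int.mod n d = 0 ↔ d.toNat ∣ n.toNat := by
        rw [PySem.Int.mod_eq_zero_iff_dvd]
        constructor
        · intro h; have : (d.toNat : Int) ∣ (n.toNat : Int) := by rw [hD, hN]; exact h
          exact_mod_cast this
        · intro h; rw [← hD, ← hN]; exact_mod_cast h
      by_cases hdvd : PySem.Int.mod n d = 0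
      · rw [if_pos hdvd]
        have hdvdN : d.toNat ∣ n.toNat := hdvd_iff.mp hdvd
        have hne_iff : (d * d ≠ n) ↔ (d.toNat * d.toNat ≠ n.toNat) := by
          constructor
          · intro h hc; apply h; rw [← hD, ← hN]; exact_mod_cast hc
          · intro h hc; apply h; have : ((d.toNat * d.toNat : Nat) : Int) = ((n.toNat : Nat) : Int) := by
              push_cast; rw [hD, hN]; exact hc
            exact_mod_cast this
        have hfd : PySem.Int.floordiv n d = ((n.toNat / d.toNat : Nat) : Int) := by
          rw [← hD, ← hN, PySem.Int.floordiv_natCast]; simp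
        rw [if_pos (⟨hccN, hdvdN⟩ : _ ∧ _)]
        by_cases hsq : d * d ≠ n
        · rw [if_pos hsq, if_pos (hne_iff.mp hsq)]
          simp only [List.map_append, List.sum_append, List.map_cons, List.map_nil,
            List.sum_cons, List.sum_nil]
          rw [hfd, hD]
          ring
        · rw [if_neg hsq, if_neg (fun h => hsq (hne_iff.mpr h))]
          simp only [List.map_append, List.sum_append, List.map_cons, List.map_nil,
            List.sum_cons, List.sum_nil]
          rw [hD]
          ring
      · rw [if_neg hdvd]
        rw [if_neg (fun h => (hdvd_iff.not.mp hdvd) h.2)]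
        ring
    · rw [if_neg hloop]
      have hsum0 : ∑ c ∈ Finset.Ico d.toNat (n.toNat + 1),
          (if c * c ≤ n.toNat ∧ c ∣ n.toNat then
             g (c : Int) + (if c * c ≠ n.toNat then g ((n.toNat / c : Nat) : Int) else 0)
           else 0) = 0 := by
        apply Finset.sum_eq_zero
        intro c hc
        have hcd : d.toNat ≤ c := (Finset.mem_Ico.mp hc).1
        have hgt : ¬ (c * c ≤ n.toNat) := by
          intro hle
          have : ((c * c : Nat) : Int) ≤ (n.toNat : Int) := by exact_mod_cast hle
          push_cast at this
          have hcD : d ≤ (c : Int) := by rw [← hD]; exact_mod_cast hcd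
          nlinarith
        rw [if_neg (fun h => hgt h.1)]
      rw [hsum0]
      ring

theorem sum_Ico_divisor_pairs (g : Int → Int) (n : Nat) (h : 1 ≤ n) :
    ∑ c ∈ Finset.Ico 1 (n + 1),
        (if c * c ≤ n ∧ c ∣ n then
           g (c : Int) + (if c * c ≠ n then g ((n / c : Nat) : Int) else 0)
         else 0)
      = ∑ c ∈ n.divisors, g (c : Int) := by
  have hdiv : n.divisors = (Finset.Ico 1 (n+1)).filter (· ∣ n) := rfl
  rw [← Finset.sum_filter]
  have hfil : (Finset.Ico 1 (n+1)).filter (fun c => c * c ≤ n ∧ c ∣ n)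
      = n.divisors.filter (fun c => c * c ≤ n) := by
    rw [hdiv, Finset.filter_filter]
    apply Finset.filter_congr
    intro c _
    simp [and_comm]
  rw [hfil]
  conv_rhs => rw [← Finset.sum_filter_add_sum_filter_not n.divisors (fun c => c * c ≤ n)]
  rw [Finset.sum_add_distrib]
  congr 1
  rw [← Finset.sum_filter, Finset.filter_filter]
  apply Finset.sum_nbij' (i := fun c => n / c) (j := fun e => n / e)
  · intro c hc
    simp only [Finset.mem_filter, Nat.mem_divisors] at hc ⊢
    obtain ⟨⟨hcdvd, hn0⟩, hcc, hcne⟩ := hc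
    have hc1 : 1 ≤ c := Nat.pos_of_dvd_of_pos hcdvd (by omega)
    have hmul : c * (n / c) = n := Nat.mul_div_cancel' hcdvd
    have hq1 : 1 ≤ n / c := Nat.div_pos (Nat.le_of_dvd (by omega) hcdvd) (by omega)
    have hlt : c + 1 ≤ n / c := by
      by_contra hle
      have h2 : c * (n / c) ≤ c * c := Nat.mul_le_mul (le_refl c) (by omega)
      omega
    have h3 : (c + 1) * (n / c) ≤ (n / c) * (n / c) := Nat.mul_le_mul hlt (le_refl _)
    have h4 : (c + 1) * (n / c) = c * (n / c) + n / c := by ring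
    refine ⟨⟨Nat.div_dvd_of_dvd hcdvd, hn0⟩, ?_⟩
    omega
  · intro e he
    simp only [Finset.mem_filter, Nat.mem_divisors] at he ⊢
    obtain ⟨⟨hedvd, hn0⟩, hee⟩ := he
    have he1 : 1 ≤ e := Nat.pos_of_dvd_of_pos hedvd (by omega)
    have hmul : e * (n / e) = n := Nat.mul_div_cancel' hedvd
    have hq1 : 1 ≤ n / e := Nat.div_pos (Nat.le_of_dvd (by omega) hedvd) (by omega)
    have hlt : n / e + 1 ≤ e := by
      by_contra hle
      have h2 : e * e ≤ e * (n / e) := Nat.mul_le_mul (le_refl e) (by omega)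
      omega
    have h3 : (n / e) * (n / e + 1) ≤ (n / e) * e := Nat.mul_le_mul (le_refl _) hlt
    have h4 : (n / e) * (n / e + 1) = (n / e) * (n / e) + n / e := by ring
    have h5 : (n / e) * e = n := by rw [mul_comm]; exact hmul
    refine ⟨⟨Nat.div_dvd_of_dvd hedvd, hn0⟩, by omega, by omega⟩
  · intro c hc
    simp only [Finset.mem_filter, Nat.mem_divisors] at hc
    exact Nat.div_div_self hc.1.1 hc.1.2
  · intro e he
    simp only [Finset.mem_filter, Nat.mem_divisors] at he
    exact Nat.div_div_self he.1.1 he.1.2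
  · intro c _
    rfl

theorem sum_divisorsA (g : Int → Int) (n : Nat) (h : 1 ≤ n) :
    ((divisorsA (n : Int)).map g).sum = ∑ c ∈ n.divisors, g (c : Int) := by
  unfold divisorsA
  have hperm := PySem.List.sorted_perm (divisorsLoopA ((n:Int)).toNat (n:Int) 1 []) (fun x : Int => x) false
  rw [(hperm.map g).sum_eq]
  rw [divisorsLoopA_sum g ((n:Int)).toNat (n:Int) 1 [] (by exact_mod_cast h) le_rfl (by simp)]
  simp only [List.map_nil, List.sum_nil, zero_add, Int.toNat_natCast, Int.toNat_one]
  exact sum_Ico_divisor_pairs g n h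

-- ---- Section 4: Möbius inversion: Σ_{d∣n} S(d) = a_n ----
theorem sum_pvS (traces : List Int) (n : Nat) (h : 0 < n) :
    ∑ d ∈ n.divisors, pvS traces d = traces.getD (n-1) 0 := by
  refine (ArithmeticFunction.sum_eq_iff_sum_smul_moebius_eq
      (R := ℤ) (f := fun m => pvS traces m) (g := fun m => traces.getD (m-1) 0)).mpr ?_ n h
  intro m hm
  rw [Nat.sum_divisorsAntidiagonal
    (f := fun d e => (ArithmeticFunction.moebius d : Int) • (traces.getD (e-1) 0 : Int))]
  unfold pvS
  apply Finset.sum_congr rfl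
  intro d hd
  rw [pvMu_eq d (Nat.pos_of_mem_divisors hd), smul_eq_mul]

-- ---- Section 5 ----

-- ---- Section 5: A = canon ----
theorem inner_sum_eq_pvS (traces : List Int) (n : Nat) (h : 1 ≤ n) :
    ((divisorsA (n : Int)).foldl (fun s d =>
        let mu := mobiusA d
        if mu = 0 then s
        else s + mu * PySem.List.pyGetD traces (PySem.Int.floordiv (n : Int) d - 1) 0) 0)
      = pvS traces n := by
  have hfun : (fun (s d : Int) =>
      let mu := mobiusA d
      if mu = 0 then s
      else s + mu * PySem.List.pyGetD traces (PySem.Int.floordiv (n : Int) d - 1) 0)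
      = fun s d => s + mobiusA d * PySem.List.pyGetD traces (PySem.Int.floordiv (n : Int) d - 1) 0 := by
    funext s d
    by_cases hmu : mobiusA d = 0
    · simp [hmu]
    · simp [hmu]
  rw [hfun, PySem.List.foldl_add, zero_add]
  rw [sum_divisorsA (fun d => mobiusA d * PySem.List.pyGetD traces (PySem.Int.floordiv (n : Int) d - 1) 0) n h]
  unfold pvS
  apply Finset.sum_congr rfl
  intro c hc
  have hc1 : 1 ≤ c := Nat.pos_of_mem_divisors hc
  have hq1 : 1 ≤ n / c := Nat.div_pos (Nat.le_of_dvd (by omega) (Nat.dvd_of_mem_divisors hc)) (by omega)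
  rw [mobiusA_eq c hc1, ← pvMu_eq c hc1, PySem.Int.floordiv_natCast]
  have hcast : ((n / c : Nat) : Int) - 1 = ((n / c - 1 : Nat) : Int) := by push_cast; omega
  rw [hcast, PySem.List.pyGetD_natCast]

theorem portA_eq_canon (traces : List Int) :
    primitive_from_traces_py traces = pvCanon traces := by
  unfold primitive_from_traces_py pvCanon
  rw [PySem.List.len_eq, PySem.List.pyRange_one]
  have hlen : ((traces.length : Int) + 1 - 1).toNat = traces.length := by omega
  rw [hlen]
  rw [List.foldl_map]
  rw [PySem.List.foldl_append_singleton_eq_map]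
  simp only [List.nil_append]
  apply List.map_congr_left
  intro k hk
  have h1k : (1 : Int) + (k : Int) = ((k + 1 : Nat) : Int) := by push_cast; ring
  rw [h1k, inner_sum_eq_pvS traces (k+1) (by omega)]
  unfold pvP
  rw [PySem.Int.floordiv_eq_ediv_of_pos (by exact_mod_cast Nat.succ_pos k)]

-- ---- Section 6: B = canon under Pre_ ----
def accSpec (traces : List Int) (k : Nat) : List Int :=
  (List.range traces.length).map (fun i =>
    traces.getD i 0 - ∑ d ∈ (i+1).divisors.filter (fun d => d ≤ k ∧ d ≠ i+1),
      (d : Int) * pvP traces d)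

theorem length_accSpec (traces : List Int) (k : Nat) :
    (accSpec traces k).length = traces.length := by
  simp [accSpec]

theorem getD_accSpec (traces : List Int) (k i : Nat) (h : i < traces.length) :
    (accSpec traces k).getD i 0
      = traces.getD i 0 - ∑ d ∈ (i+1).divisors.filter (fun d => d ≤ k ∧ d ≠ i+1),
          (d : Int) * pvP traces d := by
  unfold accSpec
  rw [List.getD_eq_getElem _ _ (by simpa using h)]
  simp [h]

theorem accSpec_zero (traces : List Int) : accSpec traces 0 = traces := by
  apply List.ext_getElem
  · simp [accSpec]
  · intro i h1 h2
    have hsum : ∑ d ∈ (i+1).divisors.filter (fun d => d ≤ 0 ∧ d ≠ i+1),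
        (d : Int) * pvP traces d = 0 := by
      apply Finset.sum_eq_zero
      intro d hd
      simp only [Finset.mem_filter] at hd
      have := Nat.pos_of_mem_divisors hd.1
      omega
    simp only [accSpec, List.getElem_map, List.getElem_range, hsum, sub_zero]
    rw [List.getD_eq_getElem _ _ h2]

-- effect of one in-place update on getD
theorem getD_set' (acc : List Int) (j i : Nat) (w : Int) (hi : i < acc.length) :
    (acc.set j w).getD i 0 = if j = i then w else acc.getD i 0 := by
  rw [List.getD_eq_getElem _ _ (by simpa using hi), List.getElem_set,
    List.getD_eq_getElem _ _ hi]

-- the inner multiples loop, for an arbitrary duplicate-free list of targets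
theorem foldl_setsub (v : Int) : ∀ (ms : List Int) (acc : List Int),
    ms.Nodup → (∀ m ∈ ms, 1 ≤ m ∧ m ≤ (acc.length : Int)) →
    (ms.foldl (fun a m => PySem.List.pySetD a (m - 1) (PySem.List.pyGetD a (m - 1) 0 - v)) acc).length = acc.length
    ∧ ∀ i : Nat, i < acc.length →
      (ms.foldl (fun a m => PySem.List.pySetD a (m - 1) (PySem.List.pyGetD a (m - 1) 0 - v)) acc).getD i 0
        = if ((i : Int) + 1) ∈ ms then acc.getD i 0 - v else acc.getD i 0 := by
  intro ms
  induction ms with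
  | nil => intro acc _ _; simp
  | cons m ms ih =>
    intro acc hnd hb
    obtain ⟨hm1, hmlen⟩ := hb m List.mem_cons_self
    have hj : (m - 1).toNat < acc.length := by omega
    have hacc1 : PySem.List.pySetD acc (m - 1) (PySem.List.pyGetD acc (m - 1) 0 - v)
        = acc.set (m-1).toNat (acc.getD (m-1).toNat 0 - v) := by
      rw [PySem.List.pySetD_of_nonneg acc _ (by omega),
        PySem.List.pyGetD_eq_getElem acc 0 (by omega) (by exact_mod_cast hmlen |>.trans_lt' (by omega))]
      rw [List.getD_eq_getElem _ _ hj]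
    simp only [List.foldl_cons]
    rw [hacc1]
    have hlen1 : (acc.set (m-1).toNat (acc.getD (m-1).toNat 0 - v)).length = acc.length :=
      List.length_set
    obtain ⟨ihlen, ihval⟩ := ih (acc.set (m-1).toNat (acc.getD (m-1).toNat 0 - v))
      (List.Nodup.of_cons hnd)
      (by intro x hx; have := hb x (List.mem_cons_of_mem m hx); rwa [hlen1])
    constructor
    · rw [ihlen, hlen1]
    · intro i hi
      rw [ihval i (by rwa [hlen1])]
      have hmem : m ∉ ms := (List.nodup_cons.mp hnd).1
      have hset := getD_set' acc (m-1).toNat i (acc.getD (m-1).toNat 0 - v) hi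
      by_cases hc : ((i : Int) + 1) = m
      · have hji : (m-1).toNat = i := by omega
        have hnotin : ((i : Int) + 1) ∉ ms := by rw [hc]; exact hmem
        rw [if_neg hnotin, hset, if_pos hji, hji,
          if_pos (show ((i : Int) + 1) ∈ m :: ms from by rw [hc]; exact List.mem_cons_self)]
      · have hji : (m-1).toNat ≠ i := by omega
        rw [hset, if_neg hji]
        by_cases hin : ((i : Int) + 1) ∈ ms
        · rw [if_pos hin, if_pos (List.mem_cons_of_mem m hin)]
        · rw [if_neg hin, if_neg (by simp [hc, hin])]

-- extending the subtracted-divisor sum by one more processed index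
theorem sum_filter_succ (f : Nat → Int) (i k : Nat) :
    ∑ d ∈ (i+1).divisors.filter (fun d => d ≤ k+1 ∧ d ≠ i+1), f d
      = (∑ d ∈ (i+1).divisors.filter (fun d => d ≤ k ∧ d ≠ i+1), f d)
        + (if (k+1) ∣ (i+1) ∧ k+1 ≠ i+1 then f (k+1) else 0) := by
  by_cases hc : (k+1) ∣ (i+1) ∧ k+1 ≠ i+1
  · rw [if_pos hc]
    have hmem : (k+1) ∈ (i+1).divisors := Nat.mem_divisors.mpr ⟨hc.1, by omega⟩
    have hsplit : (i+1).divisors.filter (fun d => d ≤ k+1 ∧ d ≠ i+1)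
        = insert (k+1) ((i+1).divisors.filter (fun d => d ≤ k ∧ d ≠ i+1)) := by
      ext d
      simp only [Finset.mem_filter, Finset.mem_insert]
      constructor
      · rintro ⟨hd, hle, hne⟩
        by_cases hdk : d = k+1
        · exact Or.inl hdk
        · exact Or.inr ⟨hd, by omega, hne⟩
      · rintro (rfl | ⟨hd, hle, hne⟩)
        · exact ⟨hmem, le_rfl, hc.2⟩
        · exact ⟨hd, by omega, hne⟩
    rw [hsplit, Finset.sum_insert (by simp)]
    ring
  · rw [if_neg hc, add_zero]
    apply Finset.sum_congr _ (fun _ _ => rfl)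
    ext d
    simp only [Finset.mem_filter, Nat.mem_divisors]
    constructor
    · rintro ⟨⟨hd, h0⟩, hle, hne⟩
      refine ⟨⟨hd, h0⟩, ?_, hne⟩
      by_cases hdk : d = k+1
      · subst hdk; exact absurd ⟨hd, hne⟩ hc
      · omega
    · rintro ⟨⟨hd, h0⟩, hle, hne⟩
      exact ⟨⟨hd, h0⟩, by omega, hne⟩

theorem B_inv (traces : List Int) (hpre : Pre_primitive_from_traces_py traces) :
    ∀ k : Nat, k ≤ traces.length →
    ((PySem.List.pyRange 1 ((k : Int) + 1) 1).foldl (fun (st : List Int × List Int) n =>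
      let acc := st.1
      let out := st.2
      let s := PySem.List.pyGetD acc (n - 1) 0
      let p := PySem.Int.floordiv s n
      let acc' := (PySem.List.pyRange (2 * n) ((traces.length : Int) + 1) n).foldl
          (fun acc m => PySem.List.pySetD acc (m - 1) (PySem.List.pyGetD acc (m - 1) 0 - n * p)) acc
      (acc', out ++ [p]))
      (traces, ([] : List Int)))
    = (accSpec traces k, (List.range k).map (fun i => pvP traces (i+1))) := by
  intro k
  induction k with
  | zero =>
    intro _
    rw [show ((0 : Nat) : Int) + 1 = 1 by norm_num, PySem.List.pyRange_one_eq_nil le_rfl]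
    simp [accSpec_zero]
  | succ k ih =>
    intro hk1
    have hkN : k ≤ traces.length := by omega
    have hsplit : PySem.List.pyRange 1 (((k+1 : Nat) : Int) + 1) 1
        = PySem.List.pyRange 1 ((k : Int) + 1) 1 ++ [(k : Int) + 1] := by
      have : (((k+1 : Nat) : Int) + 1) = ((k : Int) + 1) + 1 := by push_cast; ring
      rw [this, PySem.List.pyRange_one_succ_right (by omega)]
    rw [hsplit, List.foldl_append, ih hkN]
    simp only [List.foldl_cons, List.foldl_nil]
    -- the processed index n = k+1
    set n : Int := (k : Int) + 1 with hn
    have hnpos : 0 < n := by omega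
    have hncast : n = ((k+1 : Nat) : Int) := by push_cast [hn]; ring
    -- the value read from the accumulator is S(k+1)
    have hs : PySem.List.pyGetD (accSpec traces k) (n - 1) 0 = pvS traces (k+1) := by
      have h1 : n - 1 = ((k : Nat) : Int) := by omega
      rw [h1, PySem.List.pyGetD_natCast]
      rw [getD_accSpec traces k k (by omega)]
      have hproper : (k+1).divisors.filter (fun d => d ≤ k ∧ d ≠ k+1) = (k+1).properDivisors := by
        ext d
        simp only [Finset.mem_filter, Nat.mem_divisors, Nat.mem_properDivisors]
        constructor
        · rintro ⟨⟨hd, _⟩, hle, _⟩; exact ⟨hd, by omega⟩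
        · rintro ⟨hd, hlt⟩
          exact ⟨⟨hd, by omega⟩, by omega, by omega⟩
      rw [hproper]
      have hdP : ∀ d ∈ (k+1).properDivisors, (d : Int) * pvP traces d = pvS traces d := by
        intro d hd
        obtain ⟨hdvd, hlt⟩ := Nat.mem_properDivisors.mp hd
        have hd1 : 1 ≤ d := Nat.pos_of_dvd_of_pos hdvd (by omega)
        have hj := hpre (d-1) (Finset.mem_range.mpr (by omega))
        have hj1 : (d - 1) + 1 = d := by omega
        rw [hj1] at hj
        have hdvdS : ((d : Nat) : Int) ∣ pvS traces d := by
          have hcast : ((d - 1 : Nat) : Int) + 1 = ((d : Nat) : Int) := by push_cast; omega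
          rw [hcast] at hj
          exact Int.dvd_of_emod_eq_zero hj
        unfold pvP
        exact Int.mul_ediv_cancel' hdvdS
      rw [Finset.sum_congr rfl hdP]
      have hsum := sum_pvS traces (k+1) (by omega)
      rw [← Nat.cons_self_properDivisors (by omega : k+1 ≠ 0), Finset.sum_cons] at hsum
      have : (k+1) - 1 = k := by omega
      rw [this] at hsum
      have hrfl : (∑ d ∈ (k+1).properDivisors, pvS traces d)
          = (k+1).properDivisors.sum (pvS traces) := rfl
      omega
    have hp : PySem.Int.floordiv (pvS traces (k+1)) n = pvP traces (k+1) := by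
      rw [PySem.Int.floordiv_eq_ediv_of_pos hnpos, hncast]
      rfl
    -- the inner loop turns accSpec k into accSpec (k+1)
    have hinner : ((PySem.List.pyRange (2 * n) ((traces.length : Int) + 1) n).foldl
        (fun acc m => PySem.List.pySetD acc (m - 1)
          (PySem.List.pyGetD acc (m - 1) 0 - n * pvP traces (k+1))) (accSpec traces k))
        = accSpec traces (k+1) := by
      set ms := PySem.List.pyRange (2 * n) ((traces.length : Int) + 1) n with hms
      have hmem : ∀ x : Int, x ∈ ms ↔ 2 * n ≤ x ∧ x < (traces.length : Int) + 1 ∧ n ∣ x - 2 * n := by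
        intro x; rw [hms]; exact PySem.List.mem_pyRange_iff_of_pos hnpos x
      have hmem' : ∀ i : Nat, ((i : Int) + 1) ∈ ms ↔ ((k+1) ∣ (i+1) ∧ k+1 ≠ i+1 ∧ i < traces.length) := by
        intro i
        rw [hmem]
        constructor
        · rintro ⟨h2n, hlt, hdvd⟩
          have hdvd2 : n ∣ ((i : Int) + 1) := by
            have := dvd_add hdvd (⟨2, by ring⟩ : n ∣ 2 * n)
            simpa using this
          have hdvdN : (k+1) ∣ (i+1) := by
            have hd2 : ((k+1 : Nat) : Int) ∣ ((i+1 : Nat) : Int) := by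
              rw [← hncast]
              have hci : ((i+1 : Nat) : Int) = (i : Int) + 1 := by push_cast; ring
              rw [hci]; exact hdvd2
            exact_mod_cast hd2
          exact ⟨hdvdN, by omega, by omega⟩
        · rintro ⟨hdvd, hne, hilt⟩
          obtain ⟨q, hq⟩ := hdvd
          have hq2 : 2 ≤ q := by
            rcases q with _ | _ | q
            · omega
            · omega
            · omega
          have hmul : (k+1) * 2 ≤ (k+1) * q := Nat.mul_le_mul_left _ hq2
          have h' : 2 * (k+1) ≤ i + 1 := by rw [hq]; omega
          have h2n : 2 * n ≤ (i : Int) + 1 := by omega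
          refine ⟨h2n, by omega, ?_⟩
          have hdx : n ∣ ((i : Int) + 1) := by
            rw [hncast]
            exact_mod_cast (⟨q, hq⟩ : (k+1) ∣ (i+1))
          exact dvd_sub hdx ⟨2, by ring⟩
      have hnd : ms.Nodup := by
        rw [hms, PySem.List.pyRange_of_pos _ _ hnpos]
        apply List.Nodup.map _ List.nodup_range
        intro a b hab
        have hab' : 2 * n + n * (a : Int) = 2 * n + n * (b : Int) := hab
        have h1 : n * (a : Int) = n * (b : Int) := by omega
        have h2 := mul_left_cancel₀ (by omega : n ≠ 0) h1
        exact_mod_cast h2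
      have hbd : ∀ m ∈ ms, 1 ≤ m ∧ m ≤ ((accSpec traces k).length : Int) := by
        intro m hm
        rw [hmem] at hm
        rw [length_accSpec]
        omega
      obtain ⟨hlen, hval⟩ := foldl_setsub (n * pvP traces (k+1)) ms (accSpec traces k) hnd hbd
      apply List.ext_getElem
      · rw [hlen, length_accSpec, length_accSpec]
      · intro i hi1 hi2
        have hiN : i < traces.length := by rwa [length_accSpec] at hi2
        have hiN' : i < (accSpec traces k).length := by rwa [length_accSpec]
        rw [← List.getD_eq_getElem _ 0 hi1, ← List.getD_eq_getElem _ 0 hi2]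
        rw [hval i hiN']
        rw [getD_accSpec traces (k+1) i hiN, getD_accSpec traces k i hiN]
        rw [sum_filter_succ (fun d => (d : Int) * pvP traces d) i k]
        by_cases hcond : (k+1) ∣ (i+1) ∧ k+1 ≠ i+1
        · rw [if_pos ((hmem' i).mpr ⟨hcond.1, hcond.2, hiN⟩), if_pos hcond]
          have : n * pvP traces (k+1) = ((k+1 : Nat) : Int) * pvP traces (k+1) := by
            rw [hncast]
          rw [this]
          ring
        · rw [if_neg (fun hmm => hcond (((hmem' i).mp hmm).imp id And.left)), if_neg hcond]
          ring
    rw [hs, hp, hinner]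
    rw [List.range_succ, List.map_append]
    rfl

theorem portB_eq_canon (traces : List Int) (hpre : Pre_primitive_from_traces_py traces) :
    primitive_from_traces_py_alt traces = pvCanon traces := by
  unfold primitive_from_traces_py_alt
  simp only [PySem.List.len_eq]
  rw [B_inv traces hpre traces.length le_rfl]
  rfl

-- ===== VERDICT (by name: the statement is the Claim_ definition above) =====
theorem primitive_from_traces_py_spec : Claim_equal_primitive_from_traces_py := by
  intro traces _ hpre
  unfold Spec_primitive_from_traces_py
  rw [portA_eq_canon traces, portB_eq_canon traces hpre]
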